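-- pv_equiv track=rewrite | github.com/pjedge/longshot_study | count_accuracy.py | has_homopolymer
-- ===== SOURCE A (Python) =====
-- def has_homopolymer(mystr, N):
--     curr_letter = mystr[0]
--     count = 1
--
--     for letter in mystr[1:]:
--         if letter == curr_letter:
--             count += 1
--         else:
--             count = 1
--             curr_letter = letter
--
--         if count >= N:
--             return True
--
--     return False
-- ===== SOURCE B (Python) =====
-- def has_homopolymer(mystr, N):
--     if N > len(mystr):
--         return False
--     return any(c * N in mystr for c in set(mystr))
-- ===== Notes on version B (the rewrite author's own statement) =====
-- stated objective: idiomatic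
-- what changed: Replaces the manual run-counter loop with a distinct-character scan that tests whether the literal run c*N occurs as a substring via Python's substring search.
-- intended difference: On single-character strings with N <= 1, A returns False because its length check only runs inside the loop over mystr[1:], while B returns True, the intended value since a single character is itself a run of length 1 >= N. — e.g. on has_homopolymer("a", 1): A returns false, B returns true
import Mathlib
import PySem

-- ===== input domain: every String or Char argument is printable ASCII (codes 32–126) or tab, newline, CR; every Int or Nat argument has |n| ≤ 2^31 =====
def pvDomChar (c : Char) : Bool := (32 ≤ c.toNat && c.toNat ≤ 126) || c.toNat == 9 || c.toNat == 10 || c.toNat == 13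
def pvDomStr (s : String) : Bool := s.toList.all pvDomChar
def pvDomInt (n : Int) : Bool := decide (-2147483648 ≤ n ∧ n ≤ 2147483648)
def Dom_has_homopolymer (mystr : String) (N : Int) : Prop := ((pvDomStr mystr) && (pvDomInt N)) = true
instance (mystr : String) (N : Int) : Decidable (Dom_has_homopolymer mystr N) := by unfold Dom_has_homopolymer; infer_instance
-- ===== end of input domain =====

-- B replaces A's manual run-counter loop by an idiomatic distinct-character scan with substring
-- search (any(c*N in mystr for c in set(mystr))); B returns the intended True on the
-- single-character/N ≤ 1 corner where A returns False (see D_ below).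

-- ===== PORT A =====
-- the for-loop of A with its early return: state (curr_letter, count)
def hpLoop (rest : List Char) (curr : Char) (count : Int) (N : Int) : Bool :=
  match rest with
  | [] => false
  | letter :: rest' =>
    let st := if letter == curr then (count + 1, curr) else ((1 : Int), letter)
    if N ≤ st.1 then true else hpLoop rest' st.2 st.1 N

def has_homopolymer (mystr : String) (N : Int) : Bool :=
  match mystr.toList with
  | [] => false            -- unreachable: Python raises IndexError at mystr[0]; excluded by Pre_
  | c0 :: rest => hpLoop rest c0 1 N   -- curr_letter = mystr[0], count = 1, loop over mystr[1:]

-- ===== PORT B =====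
-- if N > len(mystr): False, else any(c * N in mystr for c in set(mystr));
-- c*N = pyRepeat [c] N, 'in' = Chars.isIn, len(mystr) = Str.len
def has_homopolymer_alt (mystr : String) (N : Int) : Bool :=
  if N > PySem.Str.len mystr then false
  else (PySem.Set.ofList mystr.toList).any (fun c =>
    PySem.Chars.isIn (PySem.List.pyRepeat [c] N) mystr.toList)

-- ===== PRECONDITION & SPEC =====
-- Pre_ excludes only the empty string, on which A raises IndexError (mystr[0]).
def Pre_has_homopolymer (mystr : String) (N : Int) : Prop := mystr ≠ ""
instance (mystr : String) (N : Int) : Decidable (Pre_has_homopolymer mystr N) := by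
  unfold Pre_has_homopolymer; infer_instance
def pvWitness_has_homopolymer : String × Int := ("aab", 2)

-- On single-character strings with N ≤ 1, A returns False (its length check only runs inside the
-- loop over mystr[1:]) while B returns True, the intended value: a single character is itself a
-- run of length 1 ≥ N.
def D_has_homopolymer (mystr : String) (N : Int) : Prop := mystr.toList.length = 1 ∧ N ≤ 1
instance (mystr : String) (N : Int) : Decidable (D_has_homopolymer mystr N) := by
  unfold D_has_homopolymer; infer_instance

def Spec_has_homopolymer (mystr : String) (N : Int) (out : Bool) : Prop :=
  ¬ D_has_homopolymer mystr N → out = has_homopolymer_alt mystr N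
instance (mystr : String) (N : Int) (out : Bool) : Decidable (Spec_has_homopolymer mystr N out) := by
  unfold Spec_has_homopolymer; infer_instance

def pvDiffWitness_has_homopolymer : String × Int := ("a", 1)
def pvDiffWitnessOut_has_homopolymer : Bool × Bool := (false, true)

-- ===== CLAIM (what is proved, stated in full; the proofs are below) =====
def Claim_unchanged_has_homopolymer : Prop := ∀ (mystr : String) (N : Int), Dom_has_homopolymer mystr N → Pre_has_homopolymer mystr N → Spec_has_homopolymer mystr N (has_homopolymer mystr N)
def Claim_changed_has_homopolymer : Prop := Dom_has_homopolymer (pvDiffWitness_has_homopolymer.1) (pvDiffWitness_has_homopolymer.2) ∧ Pre_has_homopolymer (pvDiffWitness_has_homopolymer.1) (pvDiffWitness_has_homopolymer.2) ∧ D_has_homopolymer (pvDiffWitness_has_homopolymer.1) (pvDiffWitness_has_homopolymer.2) ∧ has_homopolymer (pvDiffWitness_has_homopolymer.1) (pvDiffWitness_has_homopolymer.2) = pvDiffWitnessOut_has_homopolymer.1 ∧ has_homopolymer_alt (pvDiffWitness_has_homopolymer.1) (pvDiffWitness_has_homopolymer.2) = pvDiffWitnessOut_has_homopolymer.2 ∧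 pvDiffWitnessOut_has_homopolymer.1 ≠ pvDiffWitnessOut_has_homopolymer.2
def Claim_exact_has_homopolymer : Prop := ∀ (mystr : String) (N : Int), Dom_has_homopolymer mystr N → Pre_has_homopolymer mystr N → D_has_homopolymer mystr N → has_homopolymer mystr N ≠ has_homopolymer_alt mystr N

-- ===== LEMMAS AND PROOFS =====

-- a run of n equal chars does not fit in a block of k < n equal chars
theorem repl_not_infix_repl {n k : Nat} {c a : Char} (h : k < n) :
    ¬ (List.replicate n c <:+: List.replicate k a) := by
  intro hinf
  have := hinf.length_le
  simp at this
  omega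

-- a run of n > k copies of a is not a prefix of (a^k ++ l :: rest) when a ≠ l
theorem repl_not_prefix (k : Nat) : ∀ (n : Nat) (a l : Char) (rest : List Char), k < n → a ≠ l →
    ¬ (List.replicate n a <+: (List.replicate k a ++ l :: rest)) := by
  induction k with
  | zero =>
    intro n a l rest hk hne hpre
    obtain ⟨m, rfl⟩ : ∃ m, n = m + 1 := ⟨n - 1, by omega⟩
    rw [List.replicate_succ] at hpre
    simp at hpre
    exact hne hpre.1
  | succ k ih =>
    intro n a l rest hk hne hpre
    obtain ⟨m, rfl⟩ : ∃ m, n = m + 1 := ⟨n - 1, by omega⟩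
    rw [List.replicate_succ, List.replicate_succ] at hpre
    simp only [List.cons_append, List.cons_prefix_cons] at hpre
    exact ih m a l rest (by omega) hne hpre.2

-- crossing the boundary between a short a-block and a different letter l is impossible
theorem infix_drop_block (k : Nat) : ∀ (n : Nat) (a l c : Char) (rest : List Char), k < n → a ≠ l →
    (List.replicate n c <:+: (List.replicate k a ++ l :: rest) ↔
     List.replicate n c <:+: (l :: rest)) := by
  induction k with
  | zero => intro n a l c rest hk hne; simp
  | succ k ih =>
    intro n a l c rest hk hne
    constructor
    · intro hinf
      rw [List.replicate_succ, List.cons_append, List.infix_cons_iff] at hinf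
      rcases hinf with hpre | hinf
      · exfalso
        obtain ⟨m, rfl⟩ : ∃ m, n = m + 1 := ⟨n - 1, by omega⟩
        have hca : c = a := by
          rw [List.replicate_succ, List.cons_prefix_cons] at hpre
          exact hpre.1
        subst hca
        exact repl_not_prefix (k + 1) (m + 1) c l rest hk hne hpre
      · exact (ih n a l c rest (by omega) hne).mp hinf
    · intro hinf
      obtain ⟨s, t, hst⟩ := hinf
      exact ⟨List.replicate (k + 1) a ++ s, t, by rw [← hst]; simp⟩

-- a^k ++ a :: t = a^(k+1) ++ t
theorem repl_shift (k : Nat) (a : Char) (t : List Char) :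
    List.replicate k a ++ a :: t = List.replicate (k + 1) a ++ t := by
  rw [List.replicate_succ' , List.append_assoc]
  simp

-- loop invariant: with 2 ≤ N and 1 ≤ count < N, the loop detects exactly a run of N equal
-- characters in the virtual string curr^count ++ rest
theorem hpLoop_iff (rest : List Char) : ∀ (curr : Char) (count N : Int), 2 ≤ N → 1 ≤ count → count < N →
    (hpLoop rest curr count N = true ↔
     ∃ c, List.replicate N.toNat c <:+: (List.replicate count.toNat curr ++ rest)) := by
  induction rest with
  | nil =>
    intro curr count N hN hc1 hcN
    simp only [hpLoop, List.append_nil]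
    constructor
    · intro h; cases h
    · rintro ⟨c, hinf⟩
      exact absurd hinf (repl_not_infix_repl (by omega))
  | cons letter rest' ih =>
    intro curr count N hN hc1 hcN
    by_cases hl : letter = curr
    · subst hl
      simp only [hpLoop, beq_self_eq_true, if_true]
      by_cases hge : N ≤ count + 1
      · have hNc : N = count + 1 := by omega
        simp only [hge, if_true, true_iff]
        refine ⟨letter, ?_⟩
        rw [repl_shift, hNc]
        have : (count + 1).toNat = count.toNat + 1 := by omega
        rw [this]
        exact ⟨[], rest', by simp⟩
      · simp only [hge, if_false]
        rw [ih letter (count + 1) N hN (by omega) (by omega)]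
        rw [repl_shift]
        have : (count + 1).toNat = count.toNat + 1 := by omega
        rw [this]
    · have hb : (letter == curr) = false := by simp [hl]
      simp only [hpLoop, hb, Bool.false_eq_true, if_false]
      have h1 : ¬ (N ≤ (1 : Int)) := by omega
      rw [if_neg h1]
      rw [ih letter 1 N hN (by omega) (by omega)]
      constructor
      · rintro ⟨c, hinf⟩
        refine ⟨c, ?_⟩
        rw [infix_drop_block count.toNat N.toNat curr letter c rest' (by omega) (fun h => hl h.symm)]
        simpa using hinf
      · rintro ⟨c, hinf⟩
        refine ⟨c, ?_⟩
        rw [infix_drop_block count.toNat N.toNat curr letter c rest' (by omega) (fun h => hl h.symm)] at hinf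
        simpa using hinf

-- B detects exactly a run of N equal characters (for 1 ≤ N)
theorem alt_iff (mystr : String) (N : Int) (hN : 1 ≤ N) :
    (has_homopolymer_alt mystr N = true ↔
     ∃ c, List.replicate N.toNat c <:+: mystr.toList) := by
  unfold has_homopolymer_alt
  by_cases hlen : N > PySem.Str.len mystr
  · rw [if_pos hlen]
    constructor
    · intro h; cases h
    · rintro ⟨c, hinf⟩
      have hle := hinf.length_le
      simp [PySem.Str.len] at hle hlen
      omega
  rw [if_neg hlen]
  simp only [PySem.Str.len, not_lt] at hlen
  rw [List.any_eq_true]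
  constructor
  · rintro ⟨c, _, hin⟩
    refine ⟨c, ?_⟩
    rw [PySem.List.pyRepeat_singleton, PySem.Chars.isIn_iff_infix] at hin
    exact hin
  · rintro ⟨c, hinf⟩
    have hpos : 0 < N.toNat := by omega
    have hmem : c ∈ mystr.toList := by
      have : c ∈ List.replicate N.toNat c := by simp; omega
      exact hinf.subset this
    refine ⟨c, ?_, ?_⟩
    · rw [PySem.Set.mem_ofList]; exact hmem
    · rw [PySem.List.pyRepeat_singleton, PySem.Chars.isIn_iff_infix]; exact hinf

-- ===== VERDICT (by name: the statement is the Claim_ definition above) =====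
theorem has_homopolymer_spec : Claim_unchanged_has_homopolymer := by
  intro mystr N _ hpre hnd
  have hne : mystr.toList ≠ [] := by
    intro h
    exact hpre (String.toList_eq_nil_iff.mp h)
  obtain ⟨c0, rest, hsplit⟩ := List.exists_cons_of_ne_nil hne
  by_cases hN : 2 ≤ N
  · have hA := hpLoop_iff rest c0 1 N hN (by omega) (by omega)
    have hB := alt_iff mystr N (by omega)
    rw [hsplit] at hB
    have : List.replicate (1 : Int).toNat c0 ++ rest = c0 :: rest := by simp
    rw [this] at hA
    have := hA.trans hB.symm
    unfold has_homopolymer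
    rw [hsplit]
    exact Bool.eq_iff_iff.mpr this
  · -- N ≤ 1; ¬D and nonempty force length ≥ 2, where both are true
    have hlen : mystr.toList.length ≠ 1 := by
      intro h; exact hnd ⟨h, by omega⟩
    have : rest ≠ [] := by
      intro h; apply hlen; rw [hsplit, h]; simp
    obtain ⟨l, rest'', hr⟩ := List.exists_cons_of_ne_nil this
    have hA : has_homopolymer mystr N = true := by
      unfold has_homopolymer
      rw [hsplit, hr]
      simp only [hpLoop]
      by_cases hlc : l = c0
      · subst hlc; simp only [beq_self_eq_true, if_true]
        rw [if_pos (show N ≤ (1 : Int) + 1 by omega)]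
      · have hb : (l == c0) = false := by simp [hlc]
        simp only [hb, if_false]
        have : N ≤ (1 : Int) := by omega
        simp [this]
    have hB : has_homopolymer_alt mystr N = true := by
      unfold has_homopolymer_alt
      rw [if_neg (by simp [PySem.Str.len, - String.length_toList, hsplit, hr]; omega)]
      rw [List.any_eq_true]
      refine ⟨c0, ?_, ?_⟩
      · rw [PySem.Set.mem_ofList, hsplit]; simp
      · rw [PySem.List.pyRepeat_singleton, PySem.Chars.isIn_iff_infix, hsplit]
        have hN1 : N.toNat ≤ 1 := by omega
        interval_cases h : N.toNat
        · simp
        · exact ⟨[], rest, by simp⟩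
    rw [hA, hB]

theorem has_homopolymer_changed : Claim_changed_has_homopolymer := by
  unfold Claim_changed_has_homopolymer; decide

theorem has_homopolymer_tight : Claim_exact_has_homopolymer := by
  intro mystr N _ hpre hd
  obtain ⟨hlen, hN⟩ := hd
  have hne : mystr.toList ≠ [] := by intro h; rw [h] at hlen; simp at hlen
  obtain ⟨c0, rest, hsplit⟩ := List.exists_cons_of_ne_nil hne
  have hrest : rest = [] := by
    rw [hsplit] at hlen; simpa using hlen
  subst hrest
  have hA : has_homopolymer mystr N = false := by
    unfold has_homopolymer; rw [hsplit]; simp [hpLoop]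
  have hB : has_homopolymer_alt mystr N = true := by
    unfold has_homopolymer_alt
    rw [if_neg (by simp [PySem.Str.len, - String.length_toList, hsplit]; omega)]
    rw [List.any_eq_true]
    refine ⟨c0, ?_, ?_⟩
    · rw [PySem.Set.mem_ofList, hsplit]; simp
    · rw [PySem.List.pyRepeat_singleton, PySem.Chars.isIn_iff_infix, hsplit]
      have hN1 : N.toNat ≤ 1 := by omega
      interval_cases h : N.toNat
      · simp
      · exact ⟨[], [], by simp⟩
  rw [hA, hB]; simp
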